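-- pv_equiv track=rewrite | github.com/Dmitrii-Zavalin-Deployments/navier_stokes_solver_sred | src/step4/bc_priority.py | apply_priority_rule
-- ===== SOURCE A (Python) =====
-- def apply_priority_rule(bc_map):
--     """
--     Resolve boundary-condition conflicts at corners or edges.
--
--     Parameters
--     ----------
--     bc_map : dict
--         Maps BC type → face name.
--         Example:
--             {
--                 "no-slip": "x_min",
--                 "inlet":   "y_min",
--                 "slip":    "z_min"
--             }
--
--     Returns
--     -------
--     winning_bc_type : str
--         The BC type that wins according to the priority rule.
--
--     Notes
--     -----
--     This function does NOT modify the state or ghost cells.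
--     It only returns the winning BC type. The caller (bc_sync.py)
--     is responsible for marking overridden faces.
--     """
--
--     # ------------------------------------------------------------
--     # Priority order (highest → lowest)
--     # ------------------------------------------------------------
--     PRIORITY = [
--         "no-slip",
--         "inlet",
--         "outlet",
--         "slip",
--         "symmetry",
--         "pressure_dirichlet",
--         "pressure_neumann",
--     ]
--
--     # Find the highest-priority BC present in bc_map
--     for bc_type in PRIORITY:
--         if bc_type in bc_map:
--             return bc_type
--
--     # If nothing matches (should not happen), return arbitrary BC
--     return next(iter(bc_map.keys()))
-- ===== SOURCE B (Python) =====
-- def apply_priority_rule(bc_map):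
--     PRIORITY = [
--         "no-slip",
--         "inlet",
--         "outlet",
--         "slip",
--         "symmetry",
--         "pressure_dirichlet",
--         "pressure_neumann",
--     ]
--     rank = {t: i for i, t in enumerate(PRIORITY)}
--     # min is stable: the first key with the smallest rank wins, which is the
--     # highest-priority type present, or the first key when none is in PRIORITY.
--     return min(bc_map, key=lambda k: rank.get(k, len(PRIORITY)))
-- ===== Notes on version B (the rewrite author's own statement) =====
-- stated objective: idiomatic
-- what changed: B builds a rank table from the priority list once and returns min over the map's keys by rank (stable min), instead of A's scan of the priority list with a membership test per entry and a separate fallback branch.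
import Mathlib
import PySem

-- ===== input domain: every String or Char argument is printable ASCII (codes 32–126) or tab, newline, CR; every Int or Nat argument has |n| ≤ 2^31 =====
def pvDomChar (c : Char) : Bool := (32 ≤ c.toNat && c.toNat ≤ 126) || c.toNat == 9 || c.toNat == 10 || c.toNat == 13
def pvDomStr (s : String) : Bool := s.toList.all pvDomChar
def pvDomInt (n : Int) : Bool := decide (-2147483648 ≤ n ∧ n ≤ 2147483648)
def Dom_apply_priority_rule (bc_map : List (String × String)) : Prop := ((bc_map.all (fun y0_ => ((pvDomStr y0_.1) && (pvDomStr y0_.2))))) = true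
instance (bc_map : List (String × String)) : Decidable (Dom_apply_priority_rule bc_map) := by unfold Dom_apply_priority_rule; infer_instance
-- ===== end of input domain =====

-- B replaces A's scan of the priority list (one membership test per priority, plus a fallback branch)
-- by a rank table built once and a single stable min over the map's keys; return value only, no mutation.

-- ===== PORT A =====
def pvPriorityA : List String := ["no-slip", "inlet", "outlet", "slip", "symmetry", "pressure_dirichlet", "pressure_neumann"]

-- the `for bc_type in PRIORITY: if bc_type in bc_map: return bc_type` loop
def pvLoopA (keys : List String) : List String → Option String
  | [] => none
  | t :: rest => if keys.contains t then some t else pvLoopA keys rest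

def apply_priority_rule (bc_map : List (String × String)) : String :=
  let keys := (PySem.Dict.ofList bc_map).keys
  match pvLoopA keys pvPriorityA with
  | some t => t
  | none => keys.headD ""   -- next(iter(bc_map.keys())); an empty dict raises StopIteration in Python (excluded by Pre_)

-- ===== PORT B =====
def pvPriorityB : List String := ["no-slip", "inlet", "outlet", "slip", "symmetry", "pressure_dirichlet", "pressure_neumann"]

-- rank = {t: i for i, t in enumerate(PRIORITY)}
def pvRank : PySem.Dict String Int :=
  PySem.Dict.ofList ((PySem.List.enumerate pvPriorityB).map (fun p => (p.2, p.1)))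

-- lambda k: rank.get(k, len(PRIORITY))
def pvR (k : String) : Int := pvRank.getD k (pvPriorityB.length : Int)

def apply_priority_rule_alt (bc_map : List (String × String)) : String :=
  let keys := (PySem.Dict.ofList bc_map).keys
  (PySem.List.min? keys pvR).getD ""   -- min(bc_map, key=...); an empty dict raises ValueError in Python (excluded by Pre_)

-- ===== PRECONDITION & SPEC =====
-- Pre_ excludes only the empty map, on which Python A raises StopIteration (and Python B raises ValueError).
def Pre_apply_priority_rule (bc_map : List (String × String)) : Prop := bc_map ≠ []
instance (bc_map : List (String × String)) : Decidable (Pre_apply_priority_rule bc_map) := by unfold Pre_apply_priority_rule; infer_instance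
def pvWitness_apply_priority_rule : (List (String × String)) := [("inlet", "y_min"), ("slip", "z_min")]

def Spec_apply_priority_rule (bc_map : List (String × String)) (out : String) : Prop := out = apply_priority_rule_alt bc_map
instance (bc_map : List (String × String)) (out : String) : Decidable (Spec_apply_priority_rule bc_map out) := by unfold Spec_apply_priority_rule; infer_instance

-- ===== CLAIM (what is proved, stated in full; the proofs are below) =====
def Claim_equal_apply_priority_rule : Prop := ∀ (bc_map : List (String × String)), Dom_apply_priority_rule bc_map → Pre_apply_priority_rule bc_map → Spec_apply_priority_rule bc_map (apply_priority_rule bc_map)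

-- ===== LEMMAS AND PROOFS =====

-- the step function of Python's min (keep the accumulator on ties, replace on strictly smaller key)
def pvStep (r : String → Int) : Option String → String → Option String :=
  fun acc x => match acc with | none => some x | some m => if r x < r m then some x else some m

theorem min?_eq_foldl_pvStep (ks : List String) (r : String → Int) :
    PySem.List.min? ks r = ks.foldl (pvStep r) none := by
  unfold PySem.List.min?
  congr 1
  funext acc x
  cases acc <;> rfl

-- pvR is the if-chain over the seven priority types, defaulting to 7
theorem pvR_spec (y : String) : pvR y =
    if y = "no-slip" then 0 else if y = "inlet" then 1 else if y = "outlet" then 2 else if y = "slip" then 3 else if y = "symmetry" then 4 else if y = "pressure_dirichlet" then 5 else if y = "pressure_neumann" then 6 else 7 := by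
  by_cases e0 : y = "no-slip"
  · subst e0; decide
  by_cases e1 : y = "inlet"
  · subst e1; decide
  by_cases e2 : y = "outlet"
  · subst e2; decide
  by_cases e3 : y = "slip"
  · subst e3; decide
  by_cases e4 : y = "symmetry"
  · subst e4; decide
  by_cases e5 : y = "pressure_dirichlet"
  · subst e5; decide
  by_cases e6 : y = "pressure_neumann"
  · subst e6; decide
  have h : pvRank = PySem.Dict.mk [("no-slip", (0 : Int)), ("inlet", (1 : Int)), ("outlet", (2 : Int)), ("slip", (3 : Int)), ("symmetry", (4 : Int)), ("pressure_dirichlet", (5 : Int)), ("pressure_neumann", (6 : Int))] := by decide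
  simp only [pvR, h, PySem.Dict.getD, PySem.Dict.get?_mk_cons, beq_iff_eq]
  rw [if_neg (fun hh => e0 hh.symm), if_neg (fun hh => e1 hh.symm), if_neg (fun hh => e2 hh.symm),
      if_neg (fun hh => e3 hh.symm), if_neg (fun hh => e4 hh.symm), if_neg (fun hh => e5 hh.symm),
      if_neg (fun hh => e6 hh.symm)]
  simp [e0, e1, e2, e3, e4, e5, e6, pvPriorityB, PySem.Dict.get?]

-- an already-minimal accumulator is never replaced
theorem pvFoldStay (r : String → Int) : ∀ (t : List String) (m : String), (∀ y ∈ t, r m ≤ r y) →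
    t.foldl (pvStep r) (some m) = some m := by
  intro t
  induction t with
  | nil => intro m _; rfl
  | cons x t ih =>
      intro m hm
      have hx : ¬ r x < r m := not_lt.mpr (hm x (by simp))
      simp only [List.foldl_cons, pvStep, if_neg hx]
      exact ih m (fun y hy => hm y (by simp [hy]))

-- the unique minimizer m overtakes any strictly larger accumulator
theorem pvFoldFind (r : String → Int) : ∀ (t : List String) (a m : String), m ∈ t →
    (∀ y ∈ t, r m ≤ r y) → (∀ y ∈ t, r y = r m → y = m) → r m < r a →
    t.foldl (pvStep r) (some a) = some m := by
  intro t
  induction t with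
  | nil => intro a m hm; simp at hm
  | cons x t ih =>
      intro a m hm hmin huni ha
      by_cases hxm : x = m
      · subst hxm
        simp only [List.foldl_cons, pvStep, if_pos ha]
        exact pvFoldStay r t x (fun y hy => hmin y (by simp [hy]))
      · have hmt : m ∈ t := by
          rcases List.mem_cons.mp hm with h | h
          · exact absurd h.symm hxm
          · exact h
        have hrx : r m < r x := by
          have h1 : r m ≤ r x := hmin x (by simp)
          rcases lt_or_eq_of_le h1 with h | h
          · exact h
          · exact absurd (huni x (by simp) h.symm) hxm
        simp only [List.foldl_cons, pvStep]
        split_ifs with hcmp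
        · exact ih x m hmt (fun y hy => hmin y (by simp [hy])) (fun y hy => huni y (by simp [hy])) hrx
        · exact ih a m hmt (fun y hy => hmin y (by simp [hy])) (fun y hy => huni y (by simp [hy])) ha

-- Python's min returns the unique minimizer when there is one
theorem pvMinUnique (r : String → Int) (ks : List String) (m : String) (hm : m ∈ ks)
    (hmin : ∀ y ∈ ks, r m ≤ r y) (huni : ∀ y ∈ ks, r y = r m → y = m) :
    PySem.List.min? ks r = some m := by
  rw [min?_eq_foldl_pvStep]
  cases ks with
  | nil => simp at hm
  | cons k t =>
      have hstep : pvStep r none k = some k := rfl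
      simp only [List.foldl_cons, hstep]
      by_cases hkm : k = m
      · subst hkm
        exact pvFoldStay r t k (fun y hy => hmin y (by simp [hy]))
      · have hmt : m ∈ t := by
          rcases List.mem_cons.mp hm with h | h
          · exact absurd h.symm hkm
          · exact h
        have hrk : r m < r k := by
          have h1 : r m ≤ r k := hmin k (by simp)
          rcases lt_or_eq_of_le h1 with h | h
          · exact h
          · exact absurd (huni k (by simp) h.symm) hkm
        exact pvFoldFind r t k m hmt (fun y hy => hmin y (by simp [hy])) (fun y hy => huni y (by simp [hy])) hrk

-- with a constant key, Python's min returns the first element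
theorem pvMinConst (r : String → Int) (c : Int) (ks : List String) (hc : ∀ y ∈ ks, r y = c) :
    PySem.List.min? ks r = ks.head? := by
  rw [min?_eq_foldl_pvStep]
  cases ks with
  | nil => rfl
  | cons k t =>
      have hstep : pvStep r none k = some k := rfl
      simp only [List.foldl_cons, hstep, List.head?_cons]
      exact pvFoldStay r t k (fun y hy => by
        have h1 := hc y (by simp [hy]); have h2 := hc k (by simp); omega)

-- the two computations agree on any key list
set_option maxHeartbeats 2000000 in
theorem pvMain (ks : List String) :
    (match pvLoopA ks pvPriorityA with | some t => t | none => ks.headD "") =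
      (PySem.List.min? ks pvR).getD "" := by
  by_cases h0 : "no-slip" ∈ ks
  · have hA : pvLoopA ks pvPriorityA = some "no-slip" := by
      simp [pvLoopA, pvPriorityA, h0]
    have ci : pvR "no-slip" = 0 := by decide
    have hmin : ∀ y ∈ ks, pvR "no-slip" ≤ pvR y := by
      intro y hy
      rw [ci, pvR_spec y]
      split_ifs with e0 e1 e2 e3 e4 e5 e6
      · norm_num
      · norm_num
      · norm_num
      · norm_num
      · norm_num
      · norm_num
      · norm_num
      · norm_num
    have huni : ∀ y ∈ ks, pvR y = pvR "no-slip" → y = "no-slip" := by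
      intro y _ he
      rw [ci, pvR_spec y] at he
      split_ifs at he with e0 e1 e2 e3 e4 e5 e6
      · exact e0
      · exact absurd he (by norm_num)
      · exact absurd he (by norm_num)
      · exact absurd he (by norm_num)
      · exact absurd he (by norm_num)
      · exact absurd he (by norm_num)
      · exact absurd he (by norm_num)
      · exact absurd he (by norm_num)
    have hB : PySem.List.min? ks pvR = some "no-slip" := pvMinUnique pvR ks "no-slip" h0 hmin huni
    rw [hA, hB]
    rfl
  by_cases h1 : "inlet" ∈ ks
  · have hA : pvLoopA ks pvPriorityA = some "inlet" := by
      simp [pvLoopA, pvPriorityA, h0, h1]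
    have ci : pvR "inlet" = 1 := by decide
    have hmin : ∀ y ∈ ks, pvR "inlet" ≤ pvR y := by
      intro y hy
      rw [ci, pvR_spec y]
      split_ifs with e0 e1 e2 e3 e4 e5 e6
      · exact absurd (e0 ▸ hy) h0
      · norm_num
      · norm_num
      · norm_num
      · norm_num
      · norm_num
      · norm_num
      · norm_num
    have huni : ∀ y ∈ ks, pvR y = pvR "inlet" → y = "inlet" := by
      intro y _ he
      rw [ci, pvR_spec y] at he
      split_ifs at he with e0 e1 e2 e3 e4 e5 e6
      · exact absurd he (by norm_num)
      · exact e1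
      · exact absurd he (by norm_num)
      · exact absurd he (by norm_num)
      · exact absurd he (by norm_num)
      · exact absurd he (by norm_num)
      · exact absurd he (by norm_num)
      · exact absurd he (by norm_num)
    have hB : PySem.List.min? ks pvR = some "inlet" := pvMinUnique pvR ks "inlet" h1 hmin huni
    rw [hA, hB]
    rfl
  by_cases h2 : "outlet" ∈ ks
  · have hA : pvLoopA ks pvPriorityA = some "outlet" := by
      simp [pvLoopA, pvPriorityA, h0, h1, h2]
    have ci : pvR "outlet" = 2 := by decide
    have hmin : ∀ y ∈ ks, pvR "outlet" ≤ pvR y := by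
      intro y hy
      rw [ci, pvR_spec y]
      split_ifs with e0 e1 e2 e3 e4 e5 e6
      · exact absurd (e0 ▸ hy) h0
      · exact absurd (e1 ▸ hy) h1
      · norm_num
      · norm_num
      · norm_num
      · norm_num
      · norm_num
      · norm_num
    have huni : ∀ y ∈ ks, pvR y = pvR "outlet" → y = "outlet" := by
      intro y _ he
      rw [ci, pvR_spec y] at he
      split_ifs at he with e0 e1 e2 e3 e4 e5 e6
      · exact absurd he (by norm_num)
      · exact absurd he (by norm_num)
      · exact e2
      · exact absurd he (by norm_num)
      · exact absurd he (by norm_num)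
      · exact absurd he (by norm_num)
      · exact absurd he (by norm_num)
      · exact absurd he (by norm_num)
    have hB : PySem.List.min? ks pvR = some "outlet" := pvMinUnique pvR ks "outlet" h2 hmin huni
    rw [hA, hB]
    rfl
  by_cases h3 : "slip" ∈ ks
  · have hA : pvLoopA ks pvPriorityA = some "slip" := by
      simp [pvLoopA, pvPriorityA, h0, h1, h2, h3]
    have ci : pvR "slip" = 3 := by decide
    have hmin : ∀ y ∈ ks, pvR "slip" ≤ pvR y := by
      intro y hy
      rw [ci, pvR_spec y]
      split_ifs with e0 e1 e2 e3 e4 e5 e6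
      · exact absurd (e0 ▸ hy) h0
      · exact absurd (e1 ▸ hy) h1
      · exact absurd (e2 ▸ hy) h2
      · norm_num
      · norm_num
      · norm_num
      · norm_num
      · norm_num
    have huni : ∀ y ∈ ks, pvR y = pvR "slip" → y = "slip" := by
      intro y _ he
      rw [ci, pvR_spec y] at he
      split_ifs at he with e0 e1 e2 e3 e4 e5 e6
      · exact absurd he (by norm_num)
      · exact absurd he (by norm_num)
      · exact absurd he (by norm_num)
      · exact e3
      · exact absurd he (by norm_num)
      · exact absurd he (by norm_num)
      · exact absurd he (by norm_num)
      · exact absurd he (by norm_num)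
    have hB : PySem.List.min? ks pvR = some "slip" := pvMinUnique pvR ks "slip" h3 hmin huni
    rw [hA, hB]
    rfl
  by_cases h4 : "symmetry" ∈ ks
  · have hA : pvLoopA ks pvPriorityA = some "symmetry" := by
      simp [pvLoopA, pvPriorityA, h0, h1, h2, h3, h4]
    have ci : pvR "symmetry" = 4 := by decide
    have hmin : ∀ y ∈ ks, pvR "symmetry" ≤ pvR y := by
      intro y hy
      rw [ci, pvR_spec y]
      split_ifs with e0 e1 e2 e3 e4 e5 e6
      · exact absurd (e0 ▸ hy) h0
      · exact absurd (e1 ▸ hy) h1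
      · exact absurd (e2 ▸ hy) h2
      · exact absurd (e3 ▸ hy) h3
      · norm_num
      · norm_num
      · norm_num
      · norm_num
    have huni : ∀ y ∈ ks, pvR y = pvR "symmetry" → y = "symmetry" := by
      intro y _ he
      rw [ci, pvR_spec y] at he
      split_ifs at he with e0 e1 e2 e3 e4 e5 e6
      · exact absurd he (by norm_num)
      · exact absurd he (by norm_num)
      · exact absurd he (by norm_num)
      · exact absurd he (by norm_num)
      · exact e4
      · exact absurd he (by norm_num)
      · exact absurd he (by norm_num)
      · exact absurd he (by norm_num)
    have hB : PySem.List.min? ks pvR = some "symmetry" := pvMinUnique pvR ks "symmetry" h4 hmin huni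
    rw [hA, hB]
    rfl
  by_cases h5 : "pressure_dirichlet" ∈ ks
  · have hA : pvLoopA ks pvPriorityA = some "pressure_dirichlet" := by
      simp [pvLoopA, pvPriorityA, h0, h1, h2, h3, h4, h5]
    have ci : pvR "pressure_dirichlet" = 5 := by decide
    have hmin : ∀ y ∈ ks, pvR "pressure_dirichlet" ≤ pvR y := by
      intro y hy
      rw [ci, pvR_spec y]
      split_ifs with e0 e1 e2 e3 e4 e5 e6
      · exact absurd (e0 ▸ hy) h0
      · exact absurd (e1 ▸ hy) h1
      · exact absurd (e2 ▸ hy) h2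
      · exact absurd (e3 ▸ hy) h3
      · exact absurd (e4 ▸ hy) h4
      · norm_num
      · norm_num
      · norm_num
    have huni : ∀ y ∈ ks, pvR y = pvR "pressure_dirichlet" → y = "pressure_dirichlet" := by
      intro y _ he
      rw [ci, pvR_spec y] at he
      split_ifs at he with e0 e1 e2 e3 e4 e5 e6
      · exact absurd he (by norm_num)
      · exact absurd he (by norm_num)
      · exact absurd he (by norm_num)
      · exact absurd he (by norm_num)
      · exact absurd he (by norm_num)
      · exact e5
      · exact absurd he (by norm_num)
      · exact absurd he (by norm_num)
    have hB : PySem.List.min? ks pvR = some "pressure_dirichlet" := pvMinUnique pvR ks "pressure_dirichlet" h5 hmin huni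
    rw [hA, hB]
    rfl
  by_cases h6 : "pressure_neumann" ∈ ks
  · have hA : pvLoopA ks pvPriorityA = some "pressure_neumann" := by
      simp [pvLoopA, pvPriorityA, h0, h1, h2, h3, h4, h5, h6]
    have ci : pvR "pressure_neumann" = 6 := by decide
    have hmin : ∀ y ∈ ks, pvR "pressure_neumann" ≤ pvR y := by
      intro y hy
      rw [ci, pvR_spec y]
      split_ifs with e0 e1 e2 e3 e4 e5 e6
      · exact absurd (e0 ▸ hy) h0
      · exact absurd (e1 ▸ hy) h1
      · exact absurd (e2 ▸ hy) h2
      · exact absurd (e3 ▸ hy) h3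
      · exact absurd (e4 ▸ hy) h4
      · exact absurd (e5 ▸ hy) h5
      · norm_num
      · norm_num
    have huni : ∀ y ∈ ks, pvR y = pvR "pressure_neumann" → y = "pressure_neumann" := by
      intro y _ he
      rw [ci, pvR_spec y] at he
      split_ifs at he with e0 e1 e2 e3 e4 e5 e6
      · exact absurd he (by norm_num)
      · exact absurd he (by norm_num)
      · exact absurd he (by norm_num)
      · exact absurd he (by norm_num)
      · exact absurd he (by norm_num)
      · exact absurd he (by norm_num)
      · exact e6
      · exact absurd he (by norm_num)
    have hB : PySem.List.min? ks pvR = some "pressure_neumann" := pvMinUnique pvR ks "pressure_neumann" h6 hmin huni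
    rw [hA, hB]
    rfl
  have hA : pvLoopA ks pvPriorityA = none := by
    simp [pvLoopA, pvPriorityA, h0, h1, h2, h3, h4, h5, h6]
  have hall : ∀ y ∈ ks, pvR y = 7 := by
    intro y hy
    rw [pvR_spec y]
    split_ifs with e0 e1 e2 e3 e4 e5 e6
    · exact absurd (e0 ▸ hy) h0
    · exact absurd (e1 ▸ hy) h1
    · exact absurd (e2 ▸ hy) h2
    · exact absurd (e3 ▸ hy) h3
    · exact absurd (e4 ▸ hy) h4
    · exact absurd (e5 ▸ hy) h5
    · exact absurd (e6 ▸ hy) h6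
    · rfl
  have hB : PySem.List.min? ks pvR = ks.head? := pvMinConst pvR 7 ks hall
  rw [hA, hB]
  cases ks <;> rfl

-- ===== VERDICT (by name: the statement is the Claim_ definition above) =====
theorem apply_priority_rule_spec : Claim_equal_apply_priority_rule := by
  intro bc_map _ _
  unfold Spec_apply_priority_rule apply_priority_rule apply_priority_rule_alt
  exact pvMain (PySem.Dict.ofList bc_map).keys
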